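-- pv_equiv track=rewrite | github.com/LSTS/dune | programs/generators/imc/utils.py | beautify
-- ===== SOURCE A (Python) =====
-- def beautify(text):
--     indent = 0
--     blank = False
--     list0 = []
--
--     # Remove extra empty lines and indent.
--     lines = text.splitlines()
--     for line in lines:
--         strip = line.strip()
--         if len(strip) == 0:
--             if blank:
--                 continue
--             else:
--                 blank = True
--                 list0.append('')
--                 continue
--         else:
--             blank = False
--
--         if strip == '};' and len(list0[-1]) == 0:
--             list0.pop()
--
--         if strip == '{':
--             list0.append(' ' * indent + strip)
--             indent += 2
--         elif strip == '}' or strip == '};':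
--             indent -=2
--             list0.append(' ' * indent + strip)
--         elif strip == 'public:' or strip == 'protected:' or strip == 'public:':
--             list0.append(' ' * (indent - 2) + strip)
--         else:
--             list0.append(' ' * indent + strip)
--
--     # Remove empty lines between blocks.
--     list1 = []
--     for line in list0:
--         strip = line.strip()
--         if (strip == '}' or strip == '};') and len(list1[-1]) == 0:
--             list1.pop()
--         list1.append(line)
--
--     # Remove extra empty lines at EOF.
--     while len(list1[-1]) == 0:
--         list1.pop()
--
--     return '\n'.join(list1) + '\n'
-- ===== SOURCE B (Python) =====
-- def beautify(text):
--     indent = 0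
--     out = []
--     for line in text.splitlines():
--         s = line.strip()
--         if not s:
--             if not (out and out[-1] == ''):
--                 out.append('')
--         elif s == '{':
--             out.append(' ' * indent + s)
--             indent += 2
--         elif s == '}' or s == '};':
--             if out[-1] == '':
--                 out.pop()
--             indent -= 2
--             out.append(' ' * indent + s)
--         elif s == 'public:' or s == 'protected:':
--             out.append(' ' * (indent - 2) + s)
--         else:
--             out.append(' ' * indent + s)
--     while out[-1] == '':
--         out.pop()
--     return '\n'.join(out) + '\n'
-- ===== Notes on version B (the rewrite author's own statement) =====
-- stated objective: simpler
-- what changed: A's three phases (indenting pass with a blank-flag, a second full pass removing blank lines before closing braces, a trailing-blank loop) are fused into one forward pass that keeps a single output list, popping a blank line right before appending a closing brace; the blank-flag and the intermediate list disappear.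
-- outside the precondition, e.g. on beautify('};'): A raises IndexError, B raises IndexError; on beautify('}'): A raises IndexError, B raises IndexError
import Mathlib
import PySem

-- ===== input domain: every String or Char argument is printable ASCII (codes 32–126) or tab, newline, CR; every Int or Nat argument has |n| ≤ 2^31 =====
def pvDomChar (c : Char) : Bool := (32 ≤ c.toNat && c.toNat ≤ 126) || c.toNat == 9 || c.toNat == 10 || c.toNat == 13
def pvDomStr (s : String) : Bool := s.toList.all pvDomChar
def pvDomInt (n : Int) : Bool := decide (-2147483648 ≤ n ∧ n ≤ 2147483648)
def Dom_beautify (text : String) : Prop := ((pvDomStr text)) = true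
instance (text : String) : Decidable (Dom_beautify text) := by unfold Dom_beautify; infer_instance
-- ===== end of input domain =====

-- B fuses A's two passes and blank-flag into one pass with a single output list (objective: simpler; same O(n) cost).

-- ===== PORT A =====
-- ' ' * n : Python repeats 0 times for negative n; Int.toNat clamps negatives to 0, which is exact here.
def pvSpaces (n : Int) : String := String.ofList (List.replicate n.toNat ' ')

-- while len(list1[-1]) == 0: list1.pop()  — Python raises IndexError once the list is empty (excluded by
-- Pre_beautify); on [] the guard getLast? = some "" is false, so the port just stops there.
def pvTrim (l : List String) : List String :=
  if h : l.getLast? = some "" then pvTrim l.dropLast else l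
termination_by l.length
decreasing_by
  cases l with
  | nil => simp at h
  | cons a t => simp

-- body of A's first loop: blank-line collapse with the `blank` flag, the '};' pop (Python's list0[-1]
-- raises IndexError on [] — excluded by Pre_beautify; getLast? = some "" is false there), and the
-- indent branches in A's order.
def pvStep1 (st : Int × Bool × List String) (line : String) : Int × Bool × List String :=
  let indent := st.1
  let blank := st.2.1
  let l0 := st.2.2
  let strip := PySem.Str.strip line
  if strip = "" then
    if blank then (indent, blank, l0) else (indent, true, l0 ++ [""])
  else
    let l0 := if strip = "};" ∧ l0.getLast? = some "" then l0.dropLast else l0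
    if strip = "{" then (indent + 2, false, l0 ++ [pvSpaces indent ++ strip])
    else if strip = "}" ∨ strip = "};" then (indent - 2, false, l0 ++ [pvSpaces (indent - 2) ++ strip])
    else if strip = "public:" ∨ strip = "protected:" then (indent, false, l0 ++ [pvSpaces (indent - 2) ++ strip])
    else (indent, false, l0 ++ [pvSpaces indent ++ strip])

-- body of A's second loop: pop a blank line before a closing brace (Python's list1[-1] raises IndexError
-- on [] — excluded by Pre_beautify; the guard is false there), then append.
def pvStep2 (l1 : List String) (line : String) : List String :=
  let strip := PySem.Str.strip line
  let l1 := if (strip = "}" ∨ strip = "};") ∧ l1.getLast? = some "" then l1.dropLast else l1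
  l1 ++ [line]

def beautify (text : String) : String :=
  let lines := PySem.Str.splitlines text
  let st := lines.foldl pvStep1 (0, false, [])
  let list1 := st.2.2.foldl pvStep2 []
  PySem.Str.join "\n" (pvTrim list1) ++ "\n"

-- ===== PORT B =====
-- body of B's single loop; out[-1] on an empty list raises IndexError in Python (excluded by
-- Pre_beautify; the getLast? = some "" guard is false there).
def pvStepB (st : Int × List String) (line : String) : Int × List String :=
  let indent := st.1
  let out := st.2
  let s := PySem.Str.strip line
  if s = "" then
    if out ≠ [] ∧ out.getLast? = some "" then st else (indent, out ++ [""])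
  else if s = "{" then (indent + 2, out ++ [pvSpaces indent ++ s])
  else if s = "}" ∨ s = "};" then
    let out := if out.getLast? = some "" then out.dropLast else out
    (indent - 2, out ++ [pvSpaces (indent - 2) ++ s])
  else if s = "public:" ∨ s = "protected:" then (indent, out ++ [pvSpaces (indent - 2) ++ s])
  else (indent, out ++ [pvSpaces indent ++ s])

def beautify_alt (text : String) : String :=
  let st := (PySem.Str.splitlines text).foldl pvStepB (0, [])
  PySem.Str.join "\n" (pvTrim st.2) ++ "\n"

-- ===== PRECONDITION & SPEC =====
-- Pre_ excludes exactly the inputs on which the Python A raises IndexError: texts with no non-blank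
-- line (the final while pops the list empty), texts whose first non-blank line strips to '};' (the
-- list0[-1]/list1[-1] accesses hit an empty list), and texts whose very first line strips to '}'
-- (list1[-1] on the empty list in the second pass). Python B raises on the same inputs. The ports
-- themselves (whose getLast?-guards are simply false there) agree on every input, so the proof below
-- does not need the Pre_ hypothesis; Pre_ delimits where the claim speaks for the Pythons.
def Pre_beautify (text : String) : Prop :=
  let ls := PySem.Str.splitlines text
  let fnb := ls.find? (fun l => decide (PySem.Str.strip l ≠ ""))
  fnb.isSome = true ∧ PySem.Str.strip (fnb.getD "") ≠ "};" ∧ PySem.Str.strip (ls.headD "") ≠ "}"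
instance (text : String) : Decidable (Pre_beautify text) := by unfold Pre_beautify; infer_instance

def pvWitness_beautify : String := "int a;\n{\nx;\n\n}\n"

def Spec_beautify (text : String) (out : String) : Prop := out = beautify_alt text
instance (text : String) (out : String) : Decidable (Spec_beautify text out) := by unfold Spec_beautify; infer_instance

-- ===== CLAIM (what is proved, stated in full; the proofs are below) =====
def Claim_equal_beautify : Prop := ∀ (text : String), Dom_beautify text → Pre_beautify text → Spec_beautify text (beautify text)

-- ===== LEMMAS AND PROOFS =====

-- A's second pass as a function of the first pass's output.
def pvG (l : List String) : List String := l.foldl pvStep2 []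

lemma pvG_append (l : List String) (x : String) : pvG (l ++ [x]) = pvStep2 (pvG l) x := by
  simp only [pvG, List.foldl_append, List.foldl_cons, List.foldl_nil]

lemma pvG_last (l : List String) : (pvG l).getLast? = l.getLast? := by
  induction l using List.reverseRecOn with
  | nil => rfl
  | append_singleton l x _ => simp [pvG_append, pvStep2]

lemma strip_spaces (n : Int) (s : String) :
    PySem.Str.strip (pvSpaces n ++ s) = PySem.Str.strip s := by
  apply String.toList_inj.mp
  simp only [PySem.Str.strip, String.toList_ofList, String.toList_append, pvSpaces,
    PySem.Chars.strip]
  congr 1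
  simp only [PySem.Chars.lstrip]
  induction n.toNat with
  | zero => simp
  | succ k ih => simp [List.replicate_succ, PySem.Chars.isspace, ih]

lemma dropWhile_prefix_self {p : Char → Bool} {u v : List Char}
    (hv : List.dropWhile p v = v) (huv : u <+: v) : List.dropWhile p u = u := by
  obtain ⟨t, rfl⟩ := huv
  cases u with
  | nil => rfl
  | cons a u' =>
    rw [List.cons_append] at hv
    rw [List.dropWhile_cons] at hv ⊢
    by_cases hpa : p a = true
    · rw [if_pos hpa] at hv
      have hlen := (List.dropWhile_suffix (l := u' ++ t) p).length_le
      rw [hv] at hlen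
      simp at hlen
    · rw [if_neg hpa]

lemma rstrip_idem (l : List Char) :
    PySem.Chars.rstrip (PySem.Chars.rstrip l) = PySem.Chars.rstrip l := by
  simp [PySem.Chars.rstrip, List.dropWhile_idempotent]

lemma lstrip_strip (l : List Char) :
    PySem.Chars.lstrip (PySem.Chars.strip l) = PySem.Chars.strip l := by
  have hv : List.dropWhile PySem.Chars.isspace (PySem.Chars.lstrip l) = PySem.Chars.lstrip l :=
    List.dropWhile_idempotent _ _
  have hsuf := List.dropWhile_suffix (l := (PySem.Chars.lstrip l).reverse) PySem.Chars.isspace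
  obtain ⟨t, ht⟩ := hsuf
  have hpre : PySem.Chars.strip l <+: PySem.Chars.lstrip l := by
    refine ⟨t.reverse, ?_⟩
    simp only [PySem.Chars.strip, PySem.Chars.rstrip]
    rw [← List.reverse_append, ht, List.reverse_reverse]
  exact dropWhile_prefix_self hv hpre

lemma chars_strip_idem (l : List Char) :
    PySem.Chars.strip (PySem.Chars.strip l) = PySem.Chars.strip l := by
  show PySem.Chars.rstrip (PySem.Chars.lstrip (PySem.Chars.strip l)) = _
  rw [lstrip_strip]
  show PySem.Chars.rstrip (PySem.Chars.rstrip (PySem.Chars.lstrip l)) = _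
  rw [rstrip_idem]
  rfl

lemma strip_strip (s : String) :
    PySem.Str.strip (PySem.Str.strip s) = PySem.Str.strip s := by
  apply String.toList_inj.mp
  simp only [PySem.Str.strip, String.toList_ofList]
  exact chars_strip_idem _

lemma strip_built (n : Int) (line : String) :
    PySem.Str.strip (pvSpaces n ++ PySem.Str.strip line) = PySem.Str.strip line := by
  rw [strip_spaces, strip_strip]

lemma step2_notclosing (l : List String) (x : String)
    (hx : ¬(PySem.Str.strip x = "}" ∨ PySem.Str.strip x = "};")) :
    pvStep2 l x = l ++ [x] := by
  simp [pvStep2, hx]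

lemma step2_closing_pop (l : List String) (x : String)
    (hx : PySem.Str.strip x = "}" ∨ PySem.Str.strip x = "};") (hl : l.getLast? = some "") :
    pvStep2 l x = l.dropLast ++ [x] := by
  simp [pvStep2, hx, hl]

lemma strip_empty : PySem.Str.strip "" = "" := by
  apply String.toList_inj.mp
  simp [PySem.Str.strip, PySem.Chars.strip, PySem.Chars.lstrip, PySem.Chars.rstrip]

lemma step2_blank (l : List String) : pvStep2 l "" = l ++ [""] := by
  apply step2_notclosing
  rw [strip_empty]
  simp

lemma step2_nopop (l : List String) (x : String) (hl : ¬ l.getLast? = some "") :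
    pvStep2 l x = l ++ [x] := by
  simp [pvStep2, hl]

lemma spaces_append_ne (n : Int) (s : String) (h : s ≠ "") : pvSpaces n ++ s ≠ "" := by
  intro hc
  apply h
  apply String.toList_inj.mp
  have := congrArg String.toList hc
  simp only [String.toList_append, pvSpaces, String.toList_ofList] at this
  rcases List.append_eq_nil_iff.mp this with ⟨_, h2⟩
  simpa using h2

-- The relation maintained between A's first-pass state and B's state.
def pvInv (a : Int × Bool × List String) (b : Int × List String) : Prop :=
  a.1 = b.1 ∧
  a.2.1 = decide (a.2.2.getLast? = some "") ∧
  b.2 = pvG a.2.2 ∧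
  (a.2.2.getLast? = some "" → a.2.2.dropLast.getLast? ≠ some "")

lemma pvInv_of_append (i : Int) (l : List String) (x : String) (out : List String)
    (hx : x ≠ "") (hout : out = pvG (l ++ [x])) : pvInv (i, false, l ++ [x]) (i, out) := by
  refine ⟨rfl, ?_, hout, ?_⟩ <;> simp [hx]

lemma pvInv_step (a : Int × Bool × List String) (b : Int × List String) (line : String)
    (h : pvInv a b) : pvInv (pvStep1 a line) (pvStepB b line) := by
  obtain ⟨ia, ba, la⟩ := a
  obtain ⟨ib, ob⟩ := b
  obtain ⟨h1, h2, h3, h4⟩ := h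
  simp only at h1 h2 h3 h4
  subst h1; subst h3; rw [h2]
  by_cases hE : PySem.Str.strip line = ""
  · -- blank line
    by_cases hB : la.getLast? = some ""
    · have hg : (pvG la).getLast? = some "" := by rw [pvG_last]; exact hB
      have hne : pvG la ≠ [] := fun hc => by simp [hc] at hg
      simp only [pvStep1, pvStepB, hE, hB, hg, hne, decide_true, ne_eq,
        not_false_eq_true, and_self, if_pos]
      exact ⟨rfl, by simp [hB], rfl, h4⟩
    · have hg : ¬ (pvG la).getLast? = some "" := by rw [pvG_last]; exact hB
      have hgrow : pvG (la ++ [""]) = pvG la ++ [""] := by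
        rw [pvG_append, step2_blank]
      simp only [pvStep1, pvStepB, hE, hB, hg, decide_false, reduceIte, ne_eq,
        and_false, if_neg, not_false_eq_true]
      refine ⟨rfl, by simp, hgrow.symm, ?_⟩
      intro _
      simpa using hB
  · -- non-blank line
    have hxne : ∀ n : Int, pvSpaces n ++ PySem.Str.strip line ≠ "" :=
      fun n => spaces_append_ne n _ hE
    simp only [pvStep1, pvStepB]
    rw [if_neg hE, if_neg hE]
    by_cases hO1 : PySem.Str.strip line = "{"
    · have c1 : ¬(PySem.Str.strip line = "};" ∧ la.getLast? = some "") := by simp [hO1]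
      rw [if_neg c1, if_pos hO1, if_pos hO1]
      refine pvInv_of_append _ _ _ _ (hxne ia) ?_
      rw [pvG_append, step2_notclosing]
      rw [strip_built, hO1]
      simp
    · rw [if_neg hO1, if_neg hO1]
      by_cases hO2 : PySem.Str.strip line = "}" ∨ PySem.Str.strip line = "};"
      · rw [if_pos hO2, if_pos hO2]
        by_cases hB : la.getLast? = some ""
        · have hgB : (pvG la).getLast? = some "" := by rw [pvG_last]; exact hB
          rw [if_pos hgB]
          by_cases hsemi : PySem.Str.strip line = "};"
          · -- A pops the blank line before appending '};'; B pops it from out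
            rw [if_pos ⟨hsemi, hB⟩]
            have hdec : la.dropLast ++ [""] = la := List.dropLast_append_getLast? "" hB
            have hQ := h4 hB
            have hgd : pvG la = pvG la.dropLast ++ [""] := by
              conv_lhs => rw [← hdec]
              rw [pvG_append, step2_blank]
            refine pvInv_of_append _ _ _ _ (hxne (ia - 2)) ?_
            rw [pvG_append, step2_nopop _ _ (by rw [pvG_last]; exact hQ), hgd]
            simp
          · -- strip = "}": A keeps the blank in list0 and its pass 2 pops it; B pops it now
            have c1 : ¬(PySem.Str.strip line = "};" ∧ la.getLast? = some "") := by
              intro hc; exact hsemi hc.1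
            rw [if_neg c1]
            refine pvInv_of_append _ _ _ _ (hxne (ia - 2)) ?_
            rw [pvG_append, step2_closing_pop _ _ (by rw [strip_built]; exact hO2) hgB]
        · have hgB : ¬ (pvG la).getLast? = some "" := by rw [pvG_last]; exact hB
          have c1 : ¬(PySem.Str.strip line = "};" ∧ la.getLast? = some "") := by
            intro hc; exact hB hc.2
          rw [if_neg hgB, if_neg c1]
          refine pvInv_of_append _ _ _ _ (hxne (ia - 2)) ?_
          rw [pvG_append, step2_nopop _ _ hgB]
      · have c1 : ¬(PySem.Str.strip line = "};" ∧ la.getLast? = some "") := by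
          intro hc; exact hO2 (Or.inr hc.1)
        rw [if_neg c1, if_neg hO2, if_neg hO2]
        have hnc : ¬(PySem.Str.strip (pvSpaces (ia - 2) ++ PySem.Str.strip line) = "}"
            ∨ PySem.Str.strip (pvSpaces (ia - 2) ++ PySem.Str.strip line) = "};") := by
          rw [strip_built]; exact hO2
        have hnc' : ¬(PySem.Str.strip (pvSpaces ia ++ PySem.Str.strip line) = "}"
            ∨ PySem.Str.strip (pvSpaces ia ++ PySem.Str.strip line) = "};") := by
          rw [strip_built]; exact hO2
        by_cases hO3 : PySem.Str.strip line = "public:" ∨ PySem.Str.strip line = "protected:"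
        · rw [if_pos hO3, if_pos hO3]
          refine pvInv_of_append _ _ _ _ (hxne (ia - 2)) ?_
          rw [pvG_append, step2_notclosing _ _ hnc]
        · rw [if_neg hO3, if_neg hO3]
          refine pvInv_of_append _ _ _ _ (hxne ia) ?_
          rw [pvG_append, step2_notclosing _ _ hnc']

lemma pvInv_fold (ls : List String) (a : Int × Bool × List String) (b : Int × List String)
    (h : pvInv a b) : pvInv (ls.foldl pvStep1 a) (ls.foldl pvStepB b) := by
  induction ls generalizing a b with
  | nil => exact h
  | cons x t ih => exact ih _ _ (pvInv_step a b x h)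

-- ===== VERDICT (by name: the statement is the Claim_ definition above) =====
theorem beautify_spec : Claim_equal_beautify := by
  intro text _ _
  have h := pvInv_fold (PySem.Str.splitlines text) (0, false, []) (0, [])
    ⟨rfl, by simp, by simp [pvG], by simp⟩
  show PySem.Str.join "\n" (pvTrim (List.foldl pvStep2 []
      (List.foldl pvStep1 (0, false, []) (PySem.Str.splitlines text)).2.2)) ++ "\n" =
    PySem.Str.join "\n" (pvTrim (List.foldl pvStepB (0, []) (PySem.Str.splitlines text)).2) ++ "\n"
  rw [h.2.2.1]
  rfl
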